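-- pv_equiv track=rewrite | github.com/AeluApp/mandarin | mandarin/scheduler.py | _pick_least_recent_drill_type
-- ===== SOURCE A (Python) =====
-- def _pick_least_recent_drill_type(modality_history: dict, weak_modality: str,
--                                   weak_stage: str) -> str:
--     """Choose a drill type that hasn't been practiced recently for this item.
--
--     Uses the modality_history JSON (drill_type -> last_date) to pick the drill
--     type with the oldest (or missing) timestamp, ensuring variety.
--     """
--     import json as _json
--
--     # Candidate drill types per modality, ordered by stage progression
--     _MODALITY_DRILL_TYPES = {
--         "reading": ["mc", "reverse_mc", "hanzi_to_pinyin", "english_to_pinyin",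
--                      "pinyin_to_hanzi", "translation", "contrastive"],
--         "listening": ["listening_gist", "listening_detail", "listening_tone",
--                       "listening_dictation"],
--         "speaking": ["speaking", "shadowing"],
--         "ime": ["ime_type"],
--     }
--
--     candidates = _MODALITY_DRILL_TYPES.get(weak_modality, ["mc"])
--     if not candidates:
--         return "mc"
--
--     if isinstance(modality_history, str):
--         try:
--             modality_history = _json.loads(modality_history)
--         except (_json.JSONDecodeError, TypeError):
--             modality_history = {}
--
--     # Sort candidates by their last practice date (oldest first, missing = highest priority)
--     def sort_key(dt):
--         return modality_history.get(dt, "")  # empty string sorts before any date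
--
--     candidates_sorted = sorted(candidates, key=sort_key)
--
--     # For early stages, restrict to simpler drill types
--     if weak_stage == "seen":
--         simple = [c for c in candidates_sorted if c in ("mc", "listening_gist", "speaking", "ime_type")]
--         if simple:
--             return simple[0]
--
--     return candidates_sorted[0]
-- ===== SOURCE B (Python) =====
-- def _pick_least_recent_drill_type(modality_history: dict, weak_modality: str,
--                                   weak_stage: str) -> str:
--     """Pick the candidate drill type whose last practice date is oldest.
--
--     Explicit if/elif candidate table and a single accumulator loop that keeps
--     the current best (oldest) candidate, instead of sorting the whole list.
--     """
--     import json as _json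
--
--     if isinstance(modality_history, str):
--         try:
--             modality_history = _json.loads(modality_history)
--         except (_json.JSONDecodeError, TypeError):
--             modality_history = {}
--
--     if weak_modality == "reading":
--         candidates = ["mc", "reverse_mc", "hanzi_to_pinyin", "english_to_pinyin",
--                       "pinyin_to_hanzi", "translation", "contrastive"]
--     elif weak_modality == "listening":
--         candidates = ["listening_gist", "listening_detail", "listening_tone",
--                       "listening_dictation"]
--     elif weak_modality == "speaking":
--         candidates = ["speaking", "shadowing"]
--     elif weak_modality == "ime":
--         candidates = ["ime_type"]
--     else:
--         candidates = ["mc"]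
--
--     pool = candidates
--     if weak_stage == "seen":
--         simple = [c for c in candidates
--                   if c in ("mc", "listening_gist", "speaking", "ime_type")]
--         if simple:
--             pool = simple
--
--     best = pool[0]
--     best_key = modality_history.get(best, "")
--     for c in pool[1:]:
--         k = modality_history.get(c, "")
--         if k < best_key:
--             best, best_key = c, k
--     return best
-- ===== Notes on version B (the rewrite author's own statement) =====
-- stated objective: simpler
-- what changed: Replaces the dict-table lookup plus full stable sort (and filtering of the sorted list) by an if/elif candidate table, filtering the original list first, and a single accumulator loop that tracks the oldest-dated candidate (first minimum on ties, matching the stable sort).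
import Mathlib
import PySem

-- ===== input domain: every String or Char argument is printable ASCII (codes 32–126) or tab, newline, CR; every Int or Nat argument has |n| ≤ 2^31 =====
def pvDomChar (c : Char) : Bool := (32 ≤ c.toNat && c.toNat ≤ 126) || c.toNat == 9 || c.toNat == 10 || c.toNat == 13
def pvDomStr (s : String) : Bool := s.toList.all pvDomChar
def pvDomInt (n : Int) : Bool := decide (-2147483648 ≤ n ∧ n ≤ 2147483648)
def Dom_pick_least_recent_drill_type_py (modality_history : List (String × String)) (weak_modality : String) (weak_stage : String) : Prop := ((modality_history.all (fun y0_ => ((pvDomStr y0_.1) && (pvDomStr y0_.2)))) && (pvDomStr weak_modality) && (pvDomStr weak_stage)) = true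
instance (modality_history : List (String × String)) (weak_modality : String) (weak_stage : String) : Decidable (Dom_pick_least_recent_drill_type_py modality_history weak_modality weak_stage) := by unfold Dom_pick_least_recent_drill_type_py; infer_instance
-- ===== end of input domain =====

-- B replaces the dict-table + full stable sort (and filtering of the sorted list) by an if/elif
-- candidate table, filter-before-select, and a single accumulator loop tracking the oldest
-- candidate (objective: simpler). modality_history is a dict here (List (String × String)),
-- so A's isinstance(str)/json branch never runs.

-- ===== PORT A =====
def pick_least_recent_drill_type_py (modality_history : List (String × String)) (weak_modality : String) (weak_stage : String) : String :=
  let MODALITY_DRILL_TYPES : PySem.Dict String (List String) :=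
    PySem.Dict.mk [("reading", ["mc", "reverse_mc", "hanzi_to_pinyin", "english_to_pinyin",
                  "pinyin_to_hanzi", "translation", "contrastive"]),
     ("listening", ["listening_gist", "listening_detail", "listening_tone",
                    "listening_dictation"]),
     ("speaking", ["speaking", "shadowing"]),
     ("ime", ["ime_type"])]
  let candidates := PySem.Dict.getD MODALITY_DRILL_TYPES weak_modality ["mc"]
  if candidates = [] then "mc"
  else
    let sort_key : String → String := fun dt => PySem.Dict.getD (PySem.Dict.mk modality_history) dt ""
    let candidates_sorted := PySem.List.sorted candidates sort_key false
    if weak_stage = "seen" then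
      let simple := candidates_sorted.filter
        (fun c => c == "mc" || c == "listening_gist" || c == "speaking" || c == "ime_type")
      if simple ≠ [] then (simple.head?).getD ""     -- simple[0]; simple nonempty here
      else (candidates_sorted.head?).getD ""         -- candidates_sorted[0]; nonempty (candidates ≠ [])
    else (candidates_sorted.head?).getD ""           -- candidates_sorted[0]; nonempty (candidates ≠ [])

-- ===== PORT B =====
-- B's loop "best/best_key over pool[1:]": structural recursion carrying the accumulator pair.
def pvSelectOldest (key : String → String) (best : String) (bestKey : String) : List String → String
  | [] => best
  | c :: rest =>
    let k := key c
    if k < bestKey then pvSelectOldest key c k rest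
    else pvSelectOldest key best bestKey rest

-- B's if/elif candidate table.
def pvCandidates (weak_modality : String) : List String :=
  if weak_modality = "reading" then
    ["mc", "reverse_mc", "hanzi_to_pinyin", "english_to_pinyin",
     "pinyin_to_hanzi", "translation", "contrastive"]
  else if weak_modality = "listening" then
    ["listening_gist", "listening_detail", "listening_tone", "listening_dictation"]
  else if weak_modality = "speaking" then
    ["speaking", "shadowing"]
  else if weak_modality = "ime" then
    ["ime_type"]
  else ["mc"]

def pick_least_recent_drill_type_py_alt (modality_history : List (String × String)) (weak_modality : String) (weak_stage : String) : String :=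
  let candidates := pvCandidates weak_modality
  let pool :=
    if weak_stage = "seen" then
      let simple := candidates.filter
        (fun c => c == "mc" || c == "listening_gist" || c == "speaking" || c == "ime_type")
      if simple ≠ [] then simple else candidates
    else candidates
  match pool with
  | [] => ""          -- unreachable: pool is never empty (Python's pool[0] is always defined)
  | b :: rest =>
    let key : String → String := fun dt => PySem.Dict.getD (PySem.Dict.mk modality_history) dt ""
    pvSelectOldest key b (key b) rest

-- ===== PRECONDITION & SPEC =====
def Spec_pick_least_recent_drill_type_py (modality_history : List (String × String)) (weak_modality : String) (weak_stage : String) (out : String) : Prop := out = pick_least_recent_drill_type_py_alt modality_history weak_modality weak_stage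
instance (modality_history : List (String × String)) (weak_modality : String) (weak_stage : String) (out : String) : Decidable (Spec_pick_least_recent_drill_type_py modality_history weak_modality weak_stage out) := by unfold Spec_pick_least_recent_drill_type_py; infer_instance

-- ===== CLAIM =====
def Claim_equal_pick_least_recent_drill_type_py : Prop := ∀ (modality_history : List (String × String)) (weak_modality : String) (weak_stage : String), Dom_pick_least_recent_drill_type_py modality_history weak_modality weak_stage → Spec_pick_least_recent_drill_type_py modality_history weak_modality weak_stage (pick_least_recent_drill_type_py modality_history weak_modality weak_stage)

-- ===== LEMMAS AND PROOFS =====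

-- head of the stable sort = first key-minimal element = Python min(xs, key=key)
theorem pv_head_sorted_eq_min? {α κ : Type} [LT κ] [DecidableLT κ] (xs : List α) (key : α → κ) :
    (PySem.List.sorted xs key false).head? = PySem.List.min? xs key := by
  induction xs using List.reverseRecOn with
  | nil => rfl
  | append_singleton xs x ih =>
    have hs : PySem.List.sorted (xs ++ [x]) key false
        = PySem.List.insertBy (fun a b => decide (key a < key b)) x (PySem.List.sorted xs key false) := by
      rw [PySem.List.sorted_eq_foldl_insertBy, PySem.List.sorted_eq_foldl_insertBy, List.foldl_append]
      rfl
    have hm : PySem.List.min? (xs ++ [x]) key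
        = (match PySem.List.min? xs key with
           | none => some x
           | some m => if key x < key m then some x else some m) := by
      simp only [PySem.List.min?, List.foldl_append, List.foldl_cons, List.foldl_nil]
      rfl
    rw [hs, hm, ← ih]
    cases h : PySem.List.sorted xs key false with
    | nil => simp [PySem.List.insertBy]
    | cons m t =>
      simp only [PySem.List.insertBy, List.head?]
      by_cases hlt : key x < key m <;> simp [hlt]

-- inserting into a sorted-so-far list commutes with filtering
theorem pv_filter_insertBy {α κ : Type} [LinearOrder κ] (key : α → κ) (p : α → Bool)
    (x : α) (l : List α) (hl : l.Pairwise (fun a b => key a ≤ key b)) :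
    (PySem.List.insertBy (fun a b => decide (key a < key b)) x l).filter p
      = if p x then PySem.List.insertBy (fun a b => decide (key a < key b)) x (l.filter p)
        else l.filter p := by
  induction l with
  | nil =>
    simp only [List.filter_nil, PySem.List.insertBy]
    split_ifs with h <;> simp [h]
  | cons m t ih =>
    have hmt : ∀ y ∈ t, key m ≤ key y := (List.pairwise_cons.mp hl).1
    have ht : t.Pairwise (fun a b => key a ≤ key b) := (List.pairwise_cons.mp hl).2
    by_cases hlt : key x < key m
    · have hfront : ∀ (l' : List α), (∀ y ∈ l', key m ≤ key y) →
          PySem.List.insertBy (fun a b => decide (key a < key b)) x l' = x :: l' := by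
        intro l' h
        cases l' with
        | nil => rfl
        | cons y ys =>
          have : key x < key y := lt_of_lt_of_le hlt (h y (List.mem_cons_self))
          simp [PySem.List.insertBy, this]
      have h1 : PySem.List.insertBy (fun a b => decide (key a < key b)) x (m :: t) = x :: m :: t := by
        simp [PySem.List.insertBy, hlt]
      rw [h1]
      by_cases hpx : p x
      · have : ∀ y ∈ (m :: t).filter p, key m ≤ key y := by
          intro y hy
          have := List.mem_of_mem_filter hy
          rcases List.mem_cons.mp this with h | h
          · simp [h]
          · exact hmt y h
        rw [hfront _ this]
        simp [hpx]
      · simp [hpx, List.filter_cons]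
    · have h1 : PySem.List.insertBy (fun a b => decide (key a < key b)) x (m :: t)
          = m :: PySem.List.insertBy (fun a b => decide (key a < key b)) x t := by
        simp [PySem.List.insertBy, hlt]
      rw [h1]
      by_cases hpm : p m <;> by_cases hpx : p x <;>
        simp [hpm, hpx, ih ht, PySem.List.insertBy, hlt]

-- filtering the stable sort = sorting the filtered list (key into a linear order)
theorem pv_filter_sorted {α κ : Type} [LinearOrder κ] (xs : List α) (key : α → κ) (p : α → Bool) :
    (PySem.List.sorted xs key false).filter p = PySem.List.sorted (xs.filter p) key false := by
  induction xs using List.reverseRecOn with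
  | nil => rfl
  | append_singleton xs x ih =>
    have hstep : ∀ (ys : List α), PySem.List.sorted (ys ++ [x]) key false
        = PySem.List.insertBy (fun a b => decide (key a < key b)) x (PySem.List.sorted ys key false) := by
      intro ys
      rw [PySem.List.sorted_eq_foldl_insertBy, PySem.List.sorted_eq_foldl_insertBy, List.foldl_append]
      rfl
    rw [hstep, pv_filter_insertBy key p x _ (PySem.List.sorted_pairwise xs key)]
    rw [List.filter_append]
    by_cases hpx : p x
    · simp only [hpx, if_true, List.filter_cons, List.filter_nil]
      rw [hstep, ih]
    · simp [hpx, ih]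

-- B's accumulator loop computes Python's min(b :: rest, key=key)
theorem pv_selectOldest_eq_min? (key : String → String) (rest : List String) :
    ∀ b : String, pvSelectOldest key b (key b) rest
      = (PySem.List.min? (b :: rest) key).getD "" := by
  induction rest with
  | nil => intro b; rfl
  | cons c t ih =>
    intro b
    have hmin : PySem.List.min? (b :: c :: t) key
        = PySem.List.min? ((if key c < key b then c else b) :: t) key := by
      simp only [PySem.List.min?, List.foldl_cons]
      by_cases h : key c < key b <;> simp [h]
    by_cases h : key c < key b
    · simp only [pvSelectOldest, h, if_true]
      rw [ih c, hmin, if_pos h]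
    · simp only [pvSelectOldest, h, if_false]
      rw [ih b, hmin, if_neg h]

-- A's sorted-head selection = B's loop selection, on any nonempty pool
theorem pv_head_sorted_eq_select (key : String → String) (b : String) (rest : List String) :
    ((PySem.List.sorted (b :: rest) key false).head?).getD ""
      = pvSelectOldest key b (key b) rest := by
  rw [pv_head_sorted_eq_min?, pv_selectOldest_eq_min?]

-- ===== VERDICT =====
theorem pick_least_recent_drill_type_py_spec : Claim_equal_pick_least_recent_drill_type_py := by
  intro mh wm ws _
  unfold Spec_pick_least_recent_drill_type_py
  unfold pick_least_recent_drill_type_py pick_least_recent_drill_type_py_alt pvCandidates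
  by_cases h1 : wm = "reading"
  · subst h1
    by_cases hs : ws = "seen" <;>
      simp [hs, PySem.Dict.getD, PySem.Dict.get?, pv_filter_sorted,
        PySem.List.sorted_eq_nil_iff, pv_head_sorted_eq_select]
  · by_cases h2 : wm = "listening"
    · subst h2
      by_cases hs : ws = "seen" <;>
        simp [hs, PySem.Dict.getD, PySem.Dict.get?, pv_filter_sorted,
          PySem.List.sorted_eq_nil_iff, pv_head_sorted_eq_select]
    · by_cases h3 : wm = "speaking"
      · subst h3
        by_cases hs : ws = "seen" <;>
          simp [hs, PySem.Dict.getD, PySem.Dict.get?, pv_filter_sorted,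
            PySem.List.sorted_eq_nil_iff, pv_head_sorted_eq_select]
      · by_cases h4 : wm = "ime"
        · subst h4
          by_cases hs : ws = "seen" <;>
            simp [hs, PySem.Dict.getD, PySem.Dict.get?, pv_filter_sorted,
              PySem.List.sorted_eq_nil_iff, pv_head_sorted_eq_select]
        · have b1 : (("reading" : String) == wm) = false := beq_eq_false_iff_ne.mpr (fun h => h1 h.symm)
          have b2 : (("listening" : String) == wm) = false := beq_eq_false_iff_ne.mpr (fun h => h2 h.symm)
          have b3 : (("speaking" : String) == wm) = false := beq_eq_false_iff_ne.mpr (fun h => h3 h.symm)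
          have b4 : (("ime" : String) == wm) = false := beq_eq_false_iff_ne.mpr (fun h => h4 h.symm)
          by_cases hs : ws = "seen" <;>
            simp [b1, b2, b3, b4, h1, h2, h3, h4, hs, PySem.Dict.getD, PySem.Dict.get?, List.find?,
              pv_filter_sorted, PySem.List.sorted_eq_nil_iff, pv_head_sorted_eq_select]
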